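-- pv_equiv track=rewrite | github.com/ParnalPatil/MR-System | i_index_map.py | words_find
-- ===== SOURCE A (Python) =====
-- def words_find(load_mapper):
--     w = []
--     for l in load_mapper:
--         random = l[1]
--         temp1 = l[0].split(" ")
--         temp = []
--         for j in temp1:
--             if j != "":
--                 temp.append((j,random))
--                 random+=len(j)+1
--         w.extend(temp)
--     return w
-- ===== SOURCE B (Python) =====
-- def words_find(load_mapper):
--     # Character-level tokenizer: one pass over each line, no split().
--     out = []
--     for text, start in load_mapper:
--         buf = []
--         off = start
--         for ch in text:
--             if ch == ' ':
--                 if buf: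
--                     out.append((''.join(buf), off))
--                     off += len(buf) + 1
--                     buf = []
--             else:
--                 buf.append(ch)
--         if buf:
--             out.append((''.join(buf), off))
--     return out
-- ===== Notes on version B (the rewrite author's own statement) =====
-- stated objective: alternative
-- what changed: Replaces split(' ')-then-loop-with-running-offset by a single character-level tokenizer state machine (buffer + offset) that never calls split and appends directly to the global output.
import Mathlib
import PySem

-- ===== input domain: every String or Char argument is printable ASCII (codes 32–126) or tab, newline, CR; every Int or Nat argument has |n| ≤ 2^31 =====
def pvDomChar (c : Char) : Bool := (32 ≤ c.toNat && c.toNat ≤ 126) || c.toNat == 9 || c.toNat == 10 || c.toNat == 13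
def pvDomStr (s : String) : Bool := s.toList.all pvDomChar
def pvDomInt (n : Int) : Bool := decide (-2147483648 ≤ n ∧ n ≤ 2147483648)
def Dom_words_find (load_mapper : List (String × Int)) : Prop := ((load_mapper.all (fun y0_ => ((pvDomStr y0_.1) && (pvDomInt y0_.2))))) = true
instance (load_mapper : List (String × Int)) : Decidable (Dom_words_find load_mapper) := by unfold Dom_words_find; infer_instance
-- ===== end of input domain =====

-- B replaces A's split(" ")-then-loop-with-running-offset by a character-level
-- tokenizer state machine (buffer + offset, no split), same cost (alternative).

-- ===== PORT A =====
def words_find (load_mapper : List (String × Int)) : List (String × Int) :=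
  load_mapper.foldl (fun w l =>
    -- random = l[1]; temp1 = l[0].split(" ") (sep " " ≠ "", so split? is always some)
    let temp1 : List String := (PySem.Str.split? l.1 " ").getD []
    -- inner loop: temp with the running offset `random`
    let st := temp1.foldl (fun (st : List (String × Int) × Int) j =>
      if j ≠ "" then (st.1 ++ [(j, st.2)], st.2 + PySem.Str.len j + 1) else st) ([], l.2)
    w ++ st.1) []

-- ===== PORT B =====
-- state = (out, buf, off); a space flushes a non-empty buffer, other chars extend it,
-- the trailing word is flushed after the char loop.
def wfStep (st : List (String × Int) × List Char × Int) (ch : Char) :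
    List (String × Int) × List Char × Int :=
  if ch = ' ' then
    if st.2.1 ≠ [] then
      (st.1 ++ [(String.ofList st.2.1, st.2.2)], [], st.2.2 + (st.2.1.length : Int) + 1)
    else st
  else (st.1, st.2.1 ++ [ch], st.2.2)

def wfFlush (st : List (String × Int) × List Char × Int) : List (String × Int) :=
  if st.2.1 ≠ [] then st.1 ++ [(String.ofList st.2.1, st.2.2)] else st.1

def words_find_alt (load_mapper : List (String × Int)) : List (String × Int) :=
  load_mapper.foldl (fun out l => wfFlush (l.1.toList.foldl wfStep (out, [], l.2))) []

-- ===== PRECONDITION & SPEC =====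
def Spec_words_find (load_mapper : List (String × Int)) (out : List (String × Int)) : Prop := out = words_find_alt load_mapper
instance (load_mapper : List (String × Int)) (out : List (String × Int)) : Decidable (Spec_words_find load_mapper out) := by unfold Spec_words_find; infer_instance

-- ===== CLAIM =====
def Claim_equal_words_find : Prop := ∀ (load_mapper : List (String × Int)), Dom_words_find load_mapper → Spec_words_find load_mapper (words_find load_mapper)

-- ===== LEMMAS AND PROOFS =====

/-- Reference: Python `split(" ")` as simple structural recursion, `cur` kept in order. -/
def wfSplitSp : List Char → List Char → List (List Char)
  | [], cur => [cur]
  | c :: rest, cur => if c = ' ' then cur :: wfSplitSp rest [] else wfSplitSp rest (cur ++ [c])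

/-- Reference for B's scan: the pairs emitted from the chars, given buffer and offset. -/
def wfScan : List Char → List Char → Int → List (String × Int)
  | [], buf, off => if buf ≠ [] then [(String.ofList buf, off)] else []
  | c :: rest, buf, off =>
    if c = ' ' then
      if buf ≠ [] then (String.ofList buf, off) :: wfScan rest [] (off + (buf.length : Int) + 1)
      else wfScan rest [] off
    else wfScan rest (buf ++ [c]) off

/-- Reference for A's inner loop: pairs from a word list with the running offset. -/
def wfPairs : List String → Int → List (String × Int)
  | [], _ => []
  | j :: js, r => if j ≠ "" then (j, r) :: wfPairs js (r + PySem.Str.len j + 1) else wfPairs js r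

def wfWeight (ws : List String) : Int :=
  (ws.map (fun j => if j ≠ "" then PySem.Str.len j + 1 else 0)).sum

/-- `splitOn.go` with enough fuel computes `wfSplitSp` (cur reversed, acc prepended). -/
theorem wf_go (l : List Char) : ∀ (fuel : Nat), l.length ≤ fuel →
    ∀ (cur : List Char) (acc : List (List Char)),
    PySem.Chars.splitOn.go [' '] fuel l cur acc = acc.reverse ++ wfSplitSp l cur.reverse := by
  induction l with
  | nil =>
    intro fuel _ cur acc
    cases fuel <;> simp [PySem.Chars.splitOn.go, wfSplitSp]
  | cons c rest ih =>
    intro fuel hf cur acc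
    cases fuel with
    | zero => simp at hf
    | succ f =>
      simp only [List.length_cons] at hf
      by_cases hc : c = ' '
      · rw [PySem.Chars.splitOn.go]
        rw [if_pos (by simp [hc, List.isPrefixOf])]
        rw [show (c :: rest).drop [' '].length = rest by simp]
        rw [ih f (by omega) [] (cur.reverse :: acc)]
        simp [wfSplitSp, hc]
      · rw [PySem.Chars.splitOn.go]
        rw [if_neg (by simp [List.isPrefixOf]; exact fun h => hc h.symm)]
        rw [ih f (by omega) (c :: cur) acc]
        simp [wfSplitSp, hc]

theorem wf_splitOn (l : List Char) : PySem.Chars.splitOn l [' '] = wfSplitSp l [] := by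
  rw [PySem.Chars.splitOn, wf_go l (l.length + 1) (by omega) [] []]
  simp

/-- A's inner loop computes `wfPairs` (plus the advanced offset). -/
theorem wfA_inner (js : List String) (acc : List (String × Int)) (r : Int) :
    js.foldl (fun (st : List (String × Int) × Int) j =>
      if j ≠ "" then (st.1 ++ [(j, st.2)], st.2 + PySem.Str.len j + 1) else st) (acc, r)
      = (acc ++ wfPairs js r, r + wfWeight js) := by
  induction js generalizing acc r with
  | nil => simp [wfPairs, wfWeight]
  | cons j js ih =>
    by_cases hj : j = ""
    · simp only [List.foldl_cons]
      rw [if_neg (by simp [hj]), ih]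
      simp [wfPairs, wfWeight, hj]
    · simp only [List.foldl_cons]
      rw [if_pos (by simpa using hj), ih]
      simp only [wfPairs, wfWeight, List.map_cons, List.sum_cons]
      rw [if_pos (by simpa using hj), if_pos (by simpa using hj)]
      simp only [List.append_assoc, List.singleton_append, Prod.mk.injEq]
      exact ⟨trivial, by ring⟩

/-- B's char loop followed by the final flush emits `wfScan`, appended to the output. -/
theorem wfB_inner (cs : List Char) (out : List (String × Int)) (buf : List Char) (off : Int) :
    wfFlush (cs.foldl wfStep (out, buf, off)) = out ++ wfScan cs buf off := by
  induction cs generalizing out buf off with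
  | nil =>
    by_cases hb : buf = [] <;> simp [wfFlush, wfScan, hb]
  | cons c rest ih =>
    simp only [List.foldl_cons]
    by_cases hc : c = ' '
    · subst hc
      by_cases hb : buf = []
      · subst hb
        rw [show wfStep (out, [], off) ' ' = (out, [], off) by simp [wfStep]]
        rw [ih out [] off]
        simp [wfScan]
      · rw [show wfStep (out, buf, off) ' '
            = (out ++ [(String.ofList buf, off)], [], off + (buf.length : Int) + 1) by
          simp [wfStep, hb]]
        rw [ih _ [] _]
        simp [wfScan, hb]
    · rw [show wfStep (out, buf, off) c = (out, buf ++ [c], off) by simp [wfStep, hc]]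
      rw [ih out (buf ++ [c]) off]
      simp [wfScan, hc]

/-- Bridge: A's pairs over the split words equal B's char scan. -/
theorem wf_bridge (cs : List Char) : ∀ (cur : List Char) (r : Int),
    wfPairs ((wfSplitSp cs cur).map String.ofList) r = wfScan cs cur r := by
  induction cs with
  | nil =>
    intro cur r
    by_cases hcur : cur = []
    · subst hcur; simp [wfSplitSp, wfPairs, wfScan]
    · simp [wfSplitSp, wfPairs, wfScan, hcur]
  | cons c rest ih =>
    intro cur r
    by_cases hc : c = ' '
    · subst hc
      rw [show wfSplitSp (' ' :: rest) cur = cur :: wfSplitSp rest [] from by simp [wfSplitSp]]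
      rw [show wfScan (' ' :: rest) cur r
          = (if cur ≠ [] then (String.ofList cur, r) :: wfScan rest [] (r + (cur.length : Int) + 1)
             else wfScan rest [] r) from by simp [wfScan]]
      by_cases hcur : cur = []
      · subst hcur
        simpa [wfPairs] using ih [] r
      · simp only [List.map_cons, wfPairs]
        rw [if_pos (by simp [hcur]), if_pos (by simpa using hcur), ih [] _]
        simp [PySem.Str.len]
    · simp only [wfSplitSp, wfScan, if_neg hc]
      exact ih (cur ++ [c]) r

/-- Per-line equality of the two loop bodies. -/
theorem wf_line (s : String) (start : Int) (out : List (String × Int)) :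
    out ++ (((PySem.Str.split? s " ").getD []).foldl (fun (st : List (String × Int) × Int) j =>
      if j ≠ "" then (st.1 ++ [(j, st.2)], st.2 + PySem.Str.len j + 1) else st) ([], start)).1
    = wfFlush (s.toList.foldl wfStep (out, [], start)) := by
  rw [wfB_inner]
  have hsplit : (PySem.Str.split? s " ").getD []
      = (wfSplitSp s.toList []).map String.ofList := by
    rw [PySem.Str.split?]
    have h2 : PySem.Chars.split? s.toList " ".toList
        = some (PySem.Chars.splitOn s.toList [' ']) := by
      simp [PySem.Chars.split?]
    rw [h2]
    simp [wf_splitOn]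
  rw [hsplit, wfA_inner, ← wf_bridge s.toList [] start]
  simp

theorem wf_main (load_mapper : List (String × Int)) :
    words_find load_mapper = words_find_alt load_mapper := by
  unfold words_find words_find_alt
  induction load_mapper using List.reverseRecOn with
  | nil => rfl
  | append_singleton xs l ih =>
    rw [List.foldl_append, List.foldl_append, ih, List.foldl_cons, List.foldl_cons,
        List.foldl_nil, List.foldl_nil]
    exact wf_line l.1 l.2 _

-- ===== VERDICT =====
theorem words_find_spec : Claim_equal_words_find :=
  fun load_mapper _ => wf_main load_mapper
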